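-- pv_equiv track=rewrite | github.com/pypi-data/pypi-mirror-384 | packages/scraper2_hj3415/scraper2_hj3415-0.5.3.tar.gz/scraper2_hj3415-0.5.3/scraper2_hj3415/scraper/dart.py | _filtering_title
-- ===== SOURCE A (Python) =====
-- def _filtering_title(overviews: list[dict[str, str]], filtering_words: list[str]) -> list[dict[str, str]]:
--     result = []
--     for item in overviews:
--         raw_title = item.get("report_nm", "")
--         clean_title = raw_title.replace(" ", "")
--         if not any(word in clean_title for word in filtering_words):
--             result.append({**item, "report_nm": clean_title})
--     return result
-- ===== SOURCE B (Python) =====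
-- def _filtering_title(overviews: list[dict[str, str]], filtering_words: list[str]) -> list[dict[str, str]]:
--     blocked = set(filtering_words)
--     lengths = {len(w) for w in filtering_words}
--
--     def keep(title):
--         return not any(title[i:i + l] in blocked
--                        for l in lengths
--                        for i in range(len(title) - l + 1))
--
--     pairs = [(item, item.get("report_nm", "").replace(" ", "")) for item in overviews]
--     return [{**item, "report_nm": clean} for item, clean in pairs if keep(clean)]
-- ===== Notes on version B (the rewrite author's own statement) =====
-- stated objective: faster
-- what changed: Replaces the per-title any-scan over the whole word list by a word set and a set of word lengths built once: each cleaned title is tested by hashing its sliding windows of those lengths into the set, and the result is assembled by comprehension over (item, cleaned) pairs instead of an append loop.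
import Mathlib
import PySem

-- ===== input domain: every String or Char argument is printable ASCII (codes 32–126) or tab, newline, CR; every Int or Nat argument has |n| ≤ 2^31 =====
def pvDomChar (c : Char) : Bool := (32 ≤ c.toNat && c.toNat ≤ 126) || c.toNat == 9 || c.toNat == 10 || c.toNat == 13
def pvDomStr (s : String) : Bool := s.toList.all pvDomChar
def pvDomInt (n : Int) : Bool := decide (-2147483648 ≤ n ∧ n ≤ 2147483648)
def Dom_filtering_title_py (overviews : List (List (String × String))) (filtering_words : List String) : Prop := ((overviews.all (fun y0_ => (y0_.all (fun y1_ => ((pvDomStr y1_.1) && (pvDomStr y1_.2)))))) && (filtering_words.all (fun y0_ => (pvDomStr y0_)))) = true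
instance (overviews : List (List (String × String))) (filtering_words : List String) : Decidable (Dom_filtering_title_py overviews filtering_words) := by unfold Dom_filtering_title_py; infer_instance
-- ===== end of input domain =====

-- B replaces the per-title any-scan over the word list by a precomputed word set plus the set of
-- word lengths, testing each title's sliding windows against the set (alternative algorithm, same results).

-- ===== PORT A =====
def filtering_title_py (overviews : List (List (String × String))) (filtering_words : List String) : List (List (String × String)) :=
  overviews.foldl (fun result item =>
    let raw_title := (PySem.Dict.ofList item).getD "report_nm" ""
    let clean_title := PySem.Str.replace raw_title " " ""
    if !(filtering_words.any fun word => PySem.Str.isIn word clean_title) then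
      result ++ [((PySem.Dict.ofList item).insert "report_nm" clean_title).items]
    else result) []

-- ===== PORT B =====
-- helper `keep` of Source B: no window of a blocked length is a blocked word
def pyKeep (blocked : List String) (lengths : List Int) (title : String) : Bool :=
  !(lengths.any fun l =>
      (PySem.List.pyRange 0 (PySem.Str.len title - l + 1) 1).any fun i =>
        PySem.Set.contains blocked (PySem.Str.slice title (some i) (some (i + l))))

def filtering_title_py_alt (overviews : List (List (String × String))) (filtering_words : List String) : List (List (String × String)) :=
  let blocked : List String := PySem.Set.ofList filtering_words
  let lengths : List Int := PySem.Set.ofList (filtering_words.map fun w => PySem.Str.len w)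
  let pairs := overviews.map fun item =>
    (item, PySem.Str.replace ((PySem.Dict.ofList item).getD "report_nm" "") " " "")
  (pairs.filter fun p => pyKeep blocked lengths p.2).map fun p =>
    ((PySem.Dict.ofList p.1).insert "report_nm" p.2).items

-- ===== PRECONDITION & SPEC =====
def Spec_filtering_title_py (overviews : List (List (String × String))) (filtering_words : List String) (out : List (List (String × String))) : Prop := out = filtering_title_py_alt overviews filtering_words
instance (overviews : List (List (String × String))) (filtering_words : List String) (out : List (List (String × String))) : Decidable (Spec_filtering_title_py overviews filtering_words out) := by unfold Spec_filtering_title_py; infer_instance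

-- ===== CLAIM (what is proved, stated in full; the proofs are below) =====
def Claim_equal_filtering_title_py : Prop := ∀ (overviews : List (List (String × String))) (filtering_words : List String), Dom_filtering_title_py overviews filtering_words → Spec_filtering_title_py overviews filtering_words (filtering_title_py overviews filtering_words)

-- ===== LEMMAS AND PROOFS =====

-- the per-title tests of A and B agree: some word occurs in the title iff some window
-- whose length is a word length is itself a word
lemma pyKeep_eq (ws : List String) (t : String) :
    pyKeep (PySem.Set.ofList ws) (PySem.Set.ofList (ws.map fun w => PySem.Str.len w)) t
      = !(ws.any fun w => PySem.Str.isIn w t) := by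
  unfold pyKeep
  congr 1
  rw [Bool.eq_iff_iff]
  simp only [List.any_eq_true]
  constructor
  · rintro ⟨l, hl, i, hi, hc⟩
    rw [PySem.Set.contains_iff, PySem.Set.mem_ofList] at hc
    refine ⟨_, hc, ?_⟩
    rw [PySem.Set.mem_ofList, List.mem_map] at hl
    obtain ⟨w0, -, rfl⟩ := hl
    rw [PySem.List.mem_pyRange_one] at hi
    obtain ⟨hi0, -⟩ := hi
    have hj : i = ((i.toNat : Nat) : Int) := (Int.toNat_of_nonneg hi0).symm
    rw [PySem.Str.isIn_iff_infix, PySem.Str.toList_slice, PySem.Str.len_eq, hj]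
    rw [show PySem.Chars.slice t.toList (some ((i.toNat : Nat) : Int))
          (some (((i.toNat : Nat) : Int) + ((w0.toList.length : Nat) : Int)))
        = PySem.List.slice t.toList (some ((i.toNat : Nat) : Int))
          (some (((i.toNat : Nat) : Int) + ((w0.toList.length : Nat) : Int))) from rfl]
    rw [PySem.List.slice_natCast_add]
    exact (List.take_prefix _ _).isInfix.trans (List.drop_suffix _ _).isInfix
  · rintro ⟨w, hw, hin⟩
    rw [PySem.Str.isIn_iff_infix] at hin
    obtain ⟨s, u, hsu⟩ := hin
    refine ⟨PySem.Str.len w, ?_, (s.length : Int), ?_, ?_⟩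
    · rw [PySem.Set.mem_ofList, List.mem_map]; exact ⟨w, hw, rfl⟩
    · rw [PySem.List.mem_pyRange_one]
      constructor
      · positivity
      · rw [PySem.Str.len_eq, PySem.Str.len_eq]
        have hlen : t.toList.length = s.length + w.toList.length + u.length := by
          rw [← hsu, List.length_append, List.length_append]
        omega
    · rw [PySem.Set.contains_iff, PySem.Set.mem_ofList]
      have hslice : PySem.Str.slice t (some (s.length : Int))
          (some ((s.length : Int) + PySem.Str.len w)) = w := by
        rw [← String.toList_inj, PySem.Str.toList_slice, PySem.Str.len_eq]
        rw [show PySem.Chars.slice t.toList (some ((s.length : Nat) : Int))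
              (some (((s.length : Nat) : Int) + ((w.toList.length : Nat) : Int)))
            = PySem.List.slice t.toList (some ((s.length : Nat) : Int))
              (some (((s.length : Nat) : Int) + ((w.toList.length : Nat) : Int))) from rfl]
        rw [PySem.List.slice_natCast_add, ← hsu, List.append_assoc,
            List.drop_left, List.take_left]
      rw [hslice]; exact hw

-- A's append loop, with a generalized accumulator, equals B's filter-map pipeline
lemma outer_eq (ws : List String) :
    ∀ (ov : List (List (String × String))) (acc : List (List (String × String))),
      ov.foldl (fun result item =>
        if !(ws.any fun word =>
              PySem.Str.isIn word (PySem.Str.replace ((PySem.Dict.ofList item).getD "report_nm" "") " " "")) then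
          result ++ [((PySem.Dict.ofList item).insert "report_nm"
              (PySem.Str.replace ((PySem.Dict.ofList item).getD "report_nm" "") " " "")).items]
        else result) acc
      = acc ++ (((ov.map fun item =>
            (item, PySem.Str.replace ((PySem.Dict.ofList item).getD "report_nm" "") " " "")).filter
              fun p => !ws.any fun w => PySem.Str.isIn w p.2).map
            fun p => ((PySem.Dict.ofList p.1).insert "report_nm" p.2).items)
  | [], acc => by simp
  | item :: rest, acc => by
      simp only [List.foldl_cons, List.map_cons, List.filter_cons]
      by_cases h : (ws.any fun word =>
          PySem.Str.isIn word (PySem.Str.replace ((PySem.Dict.ofList item).getD "report_nm" "") " " "")) = true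
      · simp only [h, Bool.not_true, Bool.false_eq_true, if_false]
        exact outer_eq ws rest acc
      · simp only [Bool.not_eq_true] at h
        simp only [h, Bool.not_false, if_true, List.map_cons]
        rw [outer_eq ws rest (acc ++ _), List.append_assoc]
        simp

-- ===== VERDICT (by name: the statement is the Claim_ definition above) =====
theorem filtering_title_py_spec : Claim_equal_filtering_title_py := by
  intro ov ws _
  show filtering_title_py ov ws = filtering_title_py_alt ov ws
  have h1 := outer_eq ws ov []
  rw [List.nil_append] at h1
  have h2 : List.filter
      (fun p => pyKeep (PySem.Set.ofList ws) (PySem.Set.ofList (ws.map fun w => PySem.Str.len w)) p.2)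
      (ov.map fun item => (item, PySem.Str.replace ((PySem.Dict.ofList item).getD "report_nm" "") " " ""))
      = List.filter (fun p => !ws.any fun w => PySem.Str.isIn w p.2)
      (ov.map fun item => (item, PySem.Str.replace ((PySem.Dict.ofList item).getD "report_nm" "") " " "")) :=
    List.filter_congr (fun p _ => pyKeep_eq ws p.2)
  calc filtering_title_py ov ws = _ := h1
    _ = filtering_title_py_alt ov ws := by
        rw [← h2]
        rfl
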